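/-
  THE CARRY LEMMAS OF THE DRIVER (gif_driver.c): the digest family (`digest_map`, `digest_extensions`, `digest_file`: no protected
  frame, an assertion `At` that every cut shares) and the driver family (`gif_decode`, `prog_main`: a protected frame at HEAP level,
  an assertion `Core` that every body cut shares). Assertions: Gif/Spec/Seg_digest_map.lean, Seg_digest_extensions.lean,
  Seg_digest_file.lean, Seg_gif_decode.lean, Seg_prog_main.lean. Worked units: farm.gif/worked/digest_bytes, digest_map.2 (digest),
  prog_main.1, gif_decode.2 (driver). Recipes and traps: farm.gif/hints/digest.md, farm.gif/hints/driver.md. Pure Lean: no machine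
  walk here. Every lemma is proved ONCE; a segment proof applies it and does not re-derive it. `RA` = `(e.reg .rsp).toNat`, the
  ENTRY's stack pointer.

  §1  THE DIGEST FAMILY: `At` FROM ONE STATE OF THE FUNCTION TO A LATER ONE
      digest_map.At.carry        `At` at a later state `s`: `rsp = RA − 40`, `r15` as it was, no shadow byte written, and the memory
                                 changed only BELOW THE FIVE SAVED REGISTERS: `[RA − 64, RA − 40)` (the return addresses of the
                                 function's calls and what its callees pushed). All 16 clauses in one step.
      digest_extensions.At.carry the same for the six saved registers, `rsp = RA − 56`, window `[RA − 128, RA − 48)`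
      digest_file.At.carry       the same for `rsp = RA − 88`, `r12` as it was, window `[RA − 224, RA − 64)` (BELOW THE SLOT OF
                                 `pixels`: the locals `h`, `ImageCount`, `total` at RA − 88 / − 76 / − 72 are inside the window, so
                                 `Head.s_count` is the unit's own clause); `GifOK` is carried too (the window lies below the cursor)
      USE at an exit of a walk from `v` (`hat : At cut … v`):
          have hun : ShadowUntouched v.mem s.mem := by v_untouched
          have hsame : Mem.SameExcept [⟨RA − 64, RA − 40⟩] v.mem s.mem := by rw [w_mem]; u_same     -- nothing stored: `Mem.SameExcept.refl _ _`
          have habi : (conv u₀).inv s := by v_inv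
          have hat' := hat.carry (cut' := Gif.L.digest_map.at_<hex>) w_rip w_rsp (w_kept.get .r15 rfl) (ProgX.Base.conv_code_in w_eq) habi hun hsame

  §2  THE DRIVER FAMILY: `Core` FROM ONE STATE OF THE BODY TO A LATER ONE
      THE DRIVER FAMILY (prog_main.1, gif_decode.P / 1 / 2 …) IS AT HEAP LEVEL: THERE IS NO `Env` (no forest, no reader before
      DGifOpen has returned): `henv.ctx.cursor_range`, `Env.at_call`, `store_stack`, `store_gif` do not apply. The prelude of a
      body segment is
          obtain ⟨hcore, …⟩ := hat ; have he := hcore.entry ; v_entry he ; have hpre := hcore.pre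
          obtain ⟨hheap, hglob, hconsts0, hin, hrep, hrep_lo, hrep_hi⟩ := hcore.pre              -- prog_main: ⟨hheap, hglob, hconsts0, hin, hout⟩
      (NEVER destructure `Core` itself: its field `r12 / rbx = (RA − k) >>> 3` must stay out of the walk's context), the walker's names
      as in farm.gif/hints/protected_frame.md with `hcore` for `hbody`, for gif_decode also `hrab := gif_decode.report_above hpre`
      and `hrl := gif_decode.reportLive hpre Hc _ _ _ (Nat.le_refl _) (Nat.le_refl _)` BEFORE the walk. A callee's `HeapPre`:
      `HeapPre.at_call` (FrameCarry.lean §5); `HeapInv` / `Consts` over stack-region stores: `HeapInv.stack_windows`; the input /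
      output of the pre: `LiveIn.of_rest`, `LiveIn.rest_offStack` (Carry.lean §4); the 64-bit signed tests: `word_msb_false`,
      `word_sgt_lit` (Words.lean §5e).
      gif_decode.BodyWin e x     the window `x` lies where the body of gif_decode may write: its stack BELOW the five saved
                                 registers `[RA − 992, RA − 40)` (the own frame's `error` and cursor, the pushed return addresses,
                                 the callees' frames), the heap's region and the shadow `[800000H, 1000020H)`, the report
                                 `[report, report + 64)`
      gif_decode.Core.carry      `Core` at a later state: `rsp`, `r12`, `r13`, `rbx`, `r15` as they were, a footprint of `BodyWin`s
                                 (it keeps the five saved registers, the return-address slot AND `Consts`)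
      gif_decode.Core.carry_eq   the same for a later state with the SAME memory (`test ; jcc`, `mov r, r` behind a call)
      prog_main.BodyWin e x      the same for prog_main: `[RA − 1168, RA − 32)` (the own `report` lies inside), `[800000H, 1000020H)`,
                                 the output `[out, out + 64)` OFF THE STACK REGION (`LiveIn.rest_offStack` in the context: `omega`)
      prog_main.Core.carry       `Core` at a later state: `rsp`, `rbx`, `r14`, `r15` as they were, a footprint of `BodyWin`s
      prog_main.Core.carry_eq    the same for a later state with the same memory
      USE behind a contract call (between `v_after_call` and the next walk) and at every exit:
          have hsame1 : Mem.SameExcept [⟨RA − 992, RA − 56⟩, ⟨0x800000, 0x1000020⟩] v.mem s_<addr>r.mem := by u_same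
          have hwin1 : ∀ x, x ∈ ([…] : List Span) → gif_decode.BodyWin e x := by
            intro x hx ; simp only [List.mem_cons, List.mem_nil_iff, or_false] at hx ; unfold gif_decode.BodyWin
            rcases hx with rfl | rfl
            · left ; simp only ; omega
            · right ; left ; simp only ; omega
          have hcore1 := hcore.carry (cut' := Gif.L.gif_decode.ret14) w_rip w_rsp (w_kept.get .r12 rfl) (w_kept.get .r13 rfl)
            (w_kept.get .rbx rfl) (w_kept.get .r15 rfl) hsame1 hwin1 w_code w_inv
      (`w_kept` stays relative to the state the FIRST walk of the theorem started from.)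
-/
import Gif.Spec.Seg_digest_map
import Gif.Spec.Seg_digest_extensions
import Gif.Spec.Seg_digest_file
import Gif.Spec.Seg_gif_decode
import Gif.Spec.Seg_prog_main
import Gif.Spec.Carry
import Gif.Spec.FrameCarry
import Gif.Spec.LzwCarry
namespace Gif.Spec
open X86 X86.User Asan ProgX.Base ProgX.Base.Spec

/-! ### 1. The digest family: `At` from one state of the function to a later one -/

/-- **`digest_map.At` THROUGH A STEP OF THE FUNCTION THAT STORED ONLY BELOW ITS FIVE SAVED REGISTERS** (the return addresses of its
calls and what its callees pushed: `[RA − 64, RA − 40)`) **and not into the shadow**: every clause of `At` is carried to the new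
state `s` at the cut `cut'`. `hrsp`, `hr15`, `hcode`, `habi` are the walker's `w_rsp`, `w_kept.get .r15 rfl`,
`ProgX.Base.conv_code_in w_eq`, `v_inv`; `hun` by `v_untouched`; `hsame` by `rw [w_mem]; u_same`. -/
theorem digest_map.At.carry {cut cut' : Word} {H : Heap} {rest : List Obj} {frames : List (Nat × FrameLayout)} {m : Option Map}
    {u₀ e : State} {ret : Word} {v s : State}
    (hat : digest_map.At cut H rest frames m u₀ e ret v)
    (hrip : s.rip = cut') (hrsp : s.reg .rsp = e.reg .rsp - 40) (hr15 : s.reg .r15 = v.reg .r15)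
    (hcode : (conv u₀).code.In s.mem) (habi : (conv u₀).inv s)
    (hun : ShadowUntouched v.mem s.mem)
    (hsame : Mem.SameExcept [⟨(e.reg .rsp).toNat - 64, (e.reg .rsp).toNat - 40⟩] v.mem s.mem) :
    digest_map.At cut' H rest frames m u₀ e ret s := by
  -- where the entry's stack pointer is
  have he_room := hat.entry.room
  have he_top := hat.entry.top
  simp only [vspec, ProgX.conv_stackLo, ProgX.conv_stackHi] at he_room he_top
  have hbase := hat.pre.1.base
  -- the window misses a slot `[RA − off, RA − off + 8)` with `8 ≤ off ≤ 40`, and the return address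
  have hmiss : ∀ (off : Nat), off ≤ 40 → ∀ w, w ∈ ([⟨(e.reg .rsp).toNat - 64, (e.reg .rsp).toNat - 40⟩] : List Span) →
      (e.reg .rsp).toNat - off + 8 ≤ w.lo ∨ w.hi ≤ (e.reg .rsp).toNat - off := by
    intro off hoff w hw
    have hw_eq := List.mem_singleton.mp hw
    rw [hw_eq]
    simp only
    omega
  have hra : s.mem.readLE (e.reg .rsp) 8 = v.mem.readLE (e.reg .rsp) 8 := by
    apply hsame.readLE _ 8 (by omega)
    intro w hw
    have hm := hmiss 0 (by omega) w hw
    omega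
  exact {
    entry := hat.entry
    pre := hat.pre
    rip := hrip
    rsp := hrsp
    r15 := by
      rw [hr15]
      exact hat.r15
    slot_r14 := slot_sameExcept hsame (e.reg .rsp) 8 8 _ (by omega) (by omega) hat.slot_r14 (hmiss 8 (by omega))
    slot_r13 := slot_sameExcept hsame (e.reg .rsp) 16 8 _ (by omega) (by omega) hat.slot_r13 (hmiss 16 (by omega))
    slot_r12 := slot_sameExcept hsame (e.reg .rsp) 24 8 _ (by omega) (by omega) hat.slot_r12 (hmiss 24 (by omega))
    slot_rbp := slot_sameExcept hsame (e.reg .rsp) 32 8 _ (by omega) (by omega) hat.slot_rbp (hmiss 32 (by omega))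
    slot_rbx := slot_sameExcept hsame (e.reg .rsp) 40 8 _ (by omega) (by omega) hat.slot_rbx (hmiss 40 (by omega))
    slot_ra := by
      rw [hra]
      exact hat.slot_ra
    inv := by
      -- the window lies below the heap's region
      refine hat.inv.sameExcept hun hsame ?_
      intro w hw
      have hw_eq := List.mem_singleton.mp hw
      rw [hw_eq, hbase]
      left
      left
      simp only
      omega
    un := Mem.EqOn.trans hat.un hun
    same := by
      -- the window lies inside the contract's 64 bytes of stack
      refine hat.same.step_same hsame ?_
      intro w hw a ha1 ha2
      have hw_eq := List.mem_singleton.mp hw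
      rw [hw_eq] at ha1 ha2
      refine ⟨_, List.mem_singleton.mpr rfl, ?_, ?_⟩
      · exact ha1
      · simp only at ha2 ⊢
        omega
    code := hcode
    abi := habi
  }

/-- **`digest_extensions.At` THROUGH A STEP OF THE FUNCTION THAT STORED ONLY BELOW ITS SIX SAVED REGISTERS** (`[RA − 128, RA − 48)`:
the alignment word at `[RA − 56, RA − 48)`, the return addresses of its calls at `[RA − 64, RA − 56)`, the callees' frames — the
deepest: digest_bytes, 64 bytes) **and not into the shadow**: every clause of `At` is carried to the new state `s` at the cut `cut'`.
The function keeps no register of the entry (all six callee-saved ones are saved and reused): there is no register hypothesis. -/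
theorem digest_extensions.At.carry {cut cut' : Word} {H : Heap} {rest : List Obj} {frames : List (Nat × FrameLayout)}
    {ex : Option Exts} {u₀ e : State} {ret : Word} {v s : State}
    (hat : digest_extensions.At cut H rest frames ex u₀ e ret v)
    (hrip : s.rip = cut') (hrsp : s.reg .rsp = e.reg .rsp - 56)
    (hcode : (conv u₀).code.In s.mem) (habi : (conv u₀).inv s)
    (hun : ShadowUntouched v.mem s.mem)
    (hsame : Mem.SameExcept [⟨(e.reg .rsp).toNat - 128, (e.reg .rsp).toNat - 48⟩] v.mem s.mem) :
    digest_extensions.At cut' H rest frames ex u₀ e ret s := by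
  have he_room := hat.entry.room
  have he_top := hat.entry.top
  simp only [vspec, ProgX.conv_stackLo, ProgX.conv_stackHi] at he_room he_top
  have hbase := hat.pre.1.base
  -- the window misses a slot `[RA − off, RA − off + 8)` with `8 ≤ off ≤ 48`, and the return address
  have hmiss : ∀ (off : Nat), off ≤ 48 → ∀ w, w ∈ ([⟨(e.reg .rsp).toNat - 128, (e.reg .rsp).toNat - 48⟩] : List Span) →
      (e.reg .rsp).toNat - off + 8 ≤ w.lo ∨ w.hi ≤ (e.reg .rsp).toNat - off := by
    intro off hoff w hw
    have hw_eq := List.mem_singleton.mp hw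
    rw [hw_eq]
    simp only
    omega
  have hra : s.mem.readLE (e.reg .rsp) 8 = v.mem.readLE (e.reg .rsp) 8 := by
    apply hsame.readLE _ 8 (by omega)
    intro w hw
    have hm := hmiss 0 (by omega) w hw
    omega
  exact {
    entry := hat.entry
    pre := hat.pre
    rip := hrip
    rsp := hrsp
    slot_r15 := slot_sameExcept hsame (e.reg .rsp) 8 8 _ (by omega) (by omega) hat.slot_r15 (hmiss 8 (by omega))
    slot_r14 := slot_sameExcept hsame (e.reg .rsp) 16 8 _ (by omega) (by omega) hat.slot_r14 (hmiss 16 (by omega))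
    slot_r13 := slot_sameExcept hsame (e.reg .rsp) 24 8 _ (by omega) (by omega) hat.slot_r13 (hmiss 24 (by omega))
    slot_r12 := slot_sameExcept hsame (e.reg .rsp) 32 8 _ (by omega) (by omega) hat.slot_r12 (hmiss 32 (by omega))
    slot_rbp := slot_sameExcept hsame (e.reg .rsp) 40 8 _ (by omega) (by omega) hat.slot_rbp (hmiss 40 (by omega))
    slot_rbx := slot_sameExcept hsame (e.reg .rsp) 48 8 _ (by omega) (by omega) hat.slot_rbx (hmiss 48 (by omega))
    slot_ra := by
      rw [hra]
      exact hat.slot_ra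
    inv := by
      -- the window lies below the heap's region
      refine hat.inv.sameExcept hun hsame ?_
      intro w hw
      have hw_eq := List.mem_singleton.mp hw
      rw [hw_eq, hbase]
      left
      left
      simp only
      omega
    un := Mem.EqOn.trans hat.un hun
    same := by
      -- the window lies inside the contract's 128 bytes of stack
      refine hat.same.step_same hsame ?_
      intro w hw a ha1 ha2
      have hw_eq := List.mem_singleton.mp hw
      rw [hw_eq] at ha1 ha2
      refine ⟨_, List.mem_singleton.mpr rfl, ?_, ?_⟩
      · exact ha1
      · simp only at ha2 ⊢
        omega
    code := hcode
    abi := habi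
  }

/-- **`digest_file.At` THROUGH A STEP OF THE FUNCTION THAT STORED ONLY BELOW THE SLOT OF `pixels`** (`[RA − 224, RA − 64)`: the locals
`h` at RA − 88, `ImageCount` at RA − 76, `total` at RA − 72, the return addresses of its calls at `[RA − 96, RA − 88)`, the callees'
frames — the deepest: digest_extensions, 128 bytes) **and not into the shadow**: every clause of `At` is carried to the new state `s`
at the cut `cut'`, THE STATE INVARIANT `GifOK` included: the window lies below the cursor (`Ctx.cursor_range`: `RA + 8 ≤ R.cur`), so
it is loose (`Loose.stack`). What a local holds behind the step (`Head.s_count`) is the unit's own clause: `u_read` / `u_frame`.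
NOT for segment 7's store `*pixels = total` (a window of its own, above the return address). -/
theorem digest_file.At.carry {cut cut' : Word} {H : Heap} {rest : List Obj} {frames : List (Nat × FrameLayout)} {F : Forest}
    {R : Rd} {u₀ e : State} {ret : Word} {v s : State}
    (hat : digest_file.At cut H rest frames F R u₀ e ret v)
    (hrip : s.rip = cut') (hrsp : s.reg .rsp = e.reg .rsp - 88) (hr12 : s.reg .r12 = v.reg .r12)
    (hcode : (conv u₀).code.In s.mem) (habi : (conv u₀).inv s)
    (hun : ShadowUntouched v.mem s.mem)
    (hsame : Mem.SameExcept [⟨(e.reg .rsp).toNat - 224, (e.reg .rsp).toNat - 64⟩] v.mem s.mem) :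
    digest_file.At cut' H rest frames F R u₀ e ret s := by
  have he_room := hat.entry.room
  have he_top := hat.entry.top
  simp only [vspec, ProgX.conv_stackLo, ProgX.conv_stackHi] at he_room he_top
  have henv := hat.pre.1
  have hbase := henv.heap.base
  have hcur := henv.ctx.cursor_range henv.heap.inv.shadow
  -- the window misses a slot `[RA − off, RA − off + 8)` with `8 ≤ off ≤ 64`, and the return address
  have hmiss : ∀ (off : Nat), off ≤ 64 → ∀ w, w ∈ ([⟨(e.reg .rsp).toNat - 224, (e.reg .rsp).toNat - 64⟩] : List Span) →
      (e.reg .rsp).toNat - off + 8 ≤ w.lo ∨ w.hi ≤ (e.reg .rsp).toNat - off := by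
    intro off hoff w hw
    have hw_eq := List.mem_singleton.mp hw
    rw [hw_eq]
    simp only
    omega
  have hra : s.mem.readLE (e.reg .rsp) 8 = v.mem.readLE (e.reg .rsp) 8 := by
    apply hsame.readLE _ 8 (by omega)
    intro w hw
    have hm := hmiss 0 (by omega) w hw
    omega
  exact {
    entry := hat.entry
    pre := hat.pre
    rip := hrip
    rsp := hrsp
    r12 := by
      rw [hr12]
      exact hat.r12
    slot_r15 := slot_sameExcept hsame (e.reg .rsp) 8 8 _ (by omega) (by omega) hat.slot_r15 (hmiss 8 (by omega))
    slot_r14 := slot_sameExcept hsame (e.reg .rsp) 16 8 _ (by omega) (by omega) hat.slot_r14 (hmiss 16 (by omega))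
    slot_r13 := slot_sameExcept hsame (e.reg .rsp) 24 8 _ (by omega) (by omega) hat.slot_r13 (hmiss 24 (by omega))
    slot_r12 := slot_sameExcept hsame (e.reg .rsp) 32 8 _ (by omega) (by omega) hat.slot_r12 (hmiss 32 (by omega))
    slot_rbp := slot_sameExcept hsame (e.reg .rsp) 40 8 _ (by omega) (by omega) hat.slot_rbp (hmiss 40 (by omega))
    slot_rbx := slot_sameExcept hsame (e.reg .rsp) 48 8 _ (by omega) (by omega) hat.slot_rbx (hmiss 48 (by omega))
    slot_ra := by
      rw [hra]
      exact hat.slot_ra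
    slot_pixels := slot_sameExcept hsame (e.reg .rsp) 64 8 _ (by omega) (by omega) hat.slot_pixels (hmiss 64 (by omega))
    inv := by
      -- the window lies below the heap's region
      refine hat.inv.sameExcept hun hsame ?_
      intro w hw
      have hw_eq := List.mem_singleton.mp hw
      rw [hw_eq, hbase]
      left
      left
      simp only
      omega
    ok := by
      -- the window lies in the stack region, below the cursor: loose
      refine hat.ok.sameExcept hat.inv.heap ⟨hcur.1, hcur.2.1⟩ hsame ?_
      intro w hw
      have hw_eq := List.mem_singleton.mp hw
      rw [hw_eq]
      apply Loose.stack hat.inv.heap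
      · simp only
        omega
      · simp only
        omega
      · simp only
        omega
    un := Mem.EqOn.trans hat.un hun
    same := by
      -- the window lies inside the contract's 224 bytes of stack
      refine hat.same.step_same hsame ?_
      intro w hw a ha1 ha2
      have hw_eq := List.mem_singleton.mp hw
      rw [hw_eq] at ha1 ha2
      refine ⟨_, List.mem_cons_self, ?_, ?_⟩
      · exact ha1
      · simp only at ha2 ⊢
        omega
    code := hcode
    abi := habi
  }

/-! ### 2. The driver family: `Core` from one state of the body to a later one -/

namespace gif_decode

/-- **A WINDOW THE BODY OF gif_decode MAY WRITE**: the function's stack BELOW the five saved registers (`[RA − 992, RA − 40)`: the own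
frame with `error` at RA − 88 and the cursor at RA − 72, the pushed return addresses, the callees' frames), the contract's window
`[800000H, 1000020H)` (the heap's region and the shadow), or the report `[report, report + 64)` (a caller's stack object, at or above
`RA + 8`: `report_above`). A footprint of such windows keeps the five saved registers, the return address and the image's constants
(`Core.carry`). Proved per window by `unfold gif_decode.BodyWin`, `left` / `right`, `simp only`, `omega`. -/
def BodyWin (e : State) (x : Span) : Prop :=
  ((e.reg .rsp).toNat - 992 ≤ x.lo ∧ x.hi ≤ (e.reg .rsp).toNat - 40) ∨
  (0x800000 ≤ x.lo ∧ x.hi ≤ 0x1000020) ∨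
  ((e.reg .rdx).toNat ≤ x.lo ∧ x.hi ≤ (e.reg .rdx).toNat + 64)

/-- **`Core` AT A LATER STATE OF THE BODY.** From `Core` at `v` to `Core` at `w`: the stack pointer, `r12`, `r13`, `rbx`, `r15` as they
were (`w_kept.get .r12 rfl` …), and the memory changed only in windows `ws` each of which is a `BodyWin`. The five slots of the saved
registers and the return-address slot `[RA, RA + 8)` are met by no such window (`RA + 8 ≤ 800000H`, `RA + 8 ≤ report`); the
constants lie below 700000H; the footprint since the entry by `Mem.SameExcept.step_same'`. Used behind EVERY contract call (`hsame`
from `v` to the returned state by `u_same`, `hcode := w_code`, `habi := w_inv`) and at every exit of a segment. -/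
theorem Core.carry {cut cut' : Word} {H : Heap} {rest : List Obj} {frames : List (Nat × FrameLayout)}
    {u₀ e : State} {ret : Word} {v w : State} {ws : List Span}
    (hc : Core cut H rest frames u₀ e ret v)
    (hrip : w.rip = cut') (hrsp : w.reg .rsp = e.reg .rsp - 136)
    (hr12 : w.reg .r12 = v.reg .r12) (hr13 : w.reg .r13 = v.reg .r13) (hrbx : w.reg .rbx = v.reg .rbx)
    (hr15 : w.reg .r15 = v.reg .r15)
    (hsame : Mem.SameExcept ws v.mem w.mem) (hws : ∀ x, x ∈ ws → BodyWin e x)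
    (hcode : (conv u₀).code.In w.mem) (habi : (conv u₀).inv w) :
    Core cut' H rest frames u₀ e ret w := by
  have he_room := hc.entry.room
  have he_top := hc.entry.top
  simp only [vspec, ProgX.conv_stackLo, ProgX.conv_stackHi] at he_room he_top
  have hrab := report_above hc.pre
  have hrep_lo := hc.pre.2.2.2.2.2.1
  have hrep_hi := hc.pre.2.2.2.2.2.2
  -- a window misses every slot `[RA − off, RA − off + 8)` with `off ≤ 40`: a saved register, the return address
  have hmiss : ∀ (off : Nat), off ≤ 40 → ∀ x, x ∈ ws →
      (e.reg .rsp).toNat - off + 8 ≤ x.lo ∨ x.hi ≤ (e.reg .rsp).toNat - off := by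
    intro off hoff x hx
    have hx' := hws x hx
    unfold BodyWin at hx'
    omega
  have hra : w.mem.readLE (e.reg .rsp) 8 = v.mem.readLE (e.reg .rsp) 8 := by
    apply hsame.readLE _ 8 (by omega)
    intro x hx
    have hm := hmiss 0 (by omega) x hx
    omega
  exact {
    entry := hc.entry
    pre := hc.pre
    rip := hrip
    rsp := hrsp
    r12 := by
      rw [hr12]
      exact hc.r12
    r13 := by
      rw [hr13]
      exact hc.r13
    rbx := by
      rw [hrbx]
      exact hc.rbx
    r15 := by
      rw [hr15]
      exact hc.r15
    slot_r14 := slot_sameExcept hsame (e.reg .rsp) 8 8 _ (by omega) (by omega) hc.slot_r14 (hmiss 8 (by omega))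
    slot_r13 := slot_sameExcept hsame (e.reg .rsp) 16 8 _ (by omega) (by omega) hc.slot_r13 (hmiss 16 (by omega))
    slot_r12 := slot_sameExcept hsame (e.reg .rsp) 24 8 _ (by omega) (by omega) hc.slot_r12 (hmiss 24 (by omega))
    slot_rbp := slot_sameExcept hsame (e.reg .rsp) 32 8 _ (by omega) (by omega) hc.slot_rbp (hmiss 32 (by omega))
    slot_rbx := slot_sameExcept hsame (e.reg .rsp) 40 8 _ (by omega) (by omega) hc.slot_rbx (hmiss 40 (by omega))
    slot_ra := by
      rw [hra]
      exact hc.slot_ra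
    consts := by
      -- every window lies at or above 700000H, the constants below 14139AH
      apply hc.consts.sameExcept hsame
      intro x hx
      have hx' := hws x hx
      unfold BodyWin at hx'
      omega
    same := by
      -- the footprint since the entry: every window is empty or lies inside one of the contract's
      apply hc.same.step_same' hsame
      intro x hx
      by_cases hempty : x.hi ≤ x.lo
      · exact Or.inl hempty
      · right
        have hx' := hws x hx
        unfold BodyWin at hx'
        simp only [X86.User.inSpans_cons, X86.User.inSpans_nil, or_false]
        omega
    code := hcode
    abi := habi
  }

/-- **`Core` AT A LATER STATE WITH THE SAME MEMORY** (`w_mem : s.mem = v.mem`: a `test ; jcc`, a `mov r, r`, a `jmp` behind a call). -/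
theorem Core.carry_eq {cut cut' : Word} {H : Heap} {rest : List Obj} {frames : List (Nat × FrameLayout)}
    {u₀ e : State} {ret : Word} {v w : State}
    (hc : Core cut H rest frames u₀ e ret v)
    (hrip : w.rip = cut') (hrsp : w.reg .rsp = e.reg .rsp - 136)
    (hr12 : w.reg .r12 = v.reg .r12) (hr13 : w.reg .r13 = v.reg .r13) (hrbx : w.reg .rbx = v.reg .rbx)
    (hr15 : w.reg .r15 = v.reg .r15)
    (hmem : w.mem = v.mem) (hcode : (conv u₀).code.In w.mem) (habi : (conv u₀).inv w) :
    Core cut' H rest frames u₀ e ret w := by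
  have hsame : Mem.SameExcept [] v.mem w.mem := by
    rw [hmem]
    exact Mem.SameExcept.refl _ _
  refine hc.carry hrip hrsp hr12 hr13 hrbx hr15 hsame ?_ hcode habi
  intro x hx
  exact absurd hx List.not_mem_nil

end gif_decode

namespace prog_main

/-- **A WINDOW THE BODY OF prog_main MAY WRITE**: the function's stack BELOW the four saved registers (`[RA − 1168, RA − 32)`: the own
frame with the `report` at RA − 136, the pushed return addresses, the callees' frames), the contract's window `[800000H, 1000020H)`
(the heap's region and the shadow), or the output `[out, out + 64)` — an object of `rest`, OFF THE STACK REGION: the third clause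
says so (with `hoff := hlive.rest_offStack hinv` in the context it is `omega`; the output's window is written only when the pre gives
its 64 live bytes). A footprint of such windows keeps the four saved registers and the return address (`Core.carry`). -/
def BodyWin (e : State) (x : Span) : Prop :=
  ((e.reg .rsp).toNat - 1168 ≤ x.lo ∧ x.hi ≤ (e.reg .rsp).toNat - 32) ∨
  (0x800000 ≤ x.lo ∧ x.hi ≤ 0x1000020) ∨
  ((e.reg .rdx).toNat ≤ x.lo ∧ x.hi ≤ (e.reg .rdx).toNat + 64 ∧ (x.hi ≤ 0x700000 ∨ 0x800000 ≤ x.lo))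

/-- **`Core` AT A LATER STATE OF THE BODY.** From `Core` at `v` to `Core` at `w`: the stack pointer, `rbx`, `r14`, `r15` as they were
(`w_kept.get .rbx rfl` …), and the memory changed only in windows `ws` each of which is a `BodyWin`. The four slots of the saved
registers and the return-address slot `[RA, RA + 8)` are met by no such window; the footprint since the entry by
`Mem.SameExcept.step_same'`. Used behind both contract calls (gif_decode, memcpy) and at every exit of the segment. -/
theorem Core.carry {cut cut' : Word} {H : Heap} {rest : List Obj} {frames : List (Nat × FrameLayout)}
    {u₀ e : State} {ret : Word} {v w : State} {ws : List Span}
    (hc : Core cut H rest frames u₀ e ret v)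
    (hrip : w.rip = cut') (hrsp : w.reg .rsp = e.reg .rsp - 168)
    (hrbx : w.reg .rbx = v.reg .rbx) (hr14 : w.reg .r14 = v.reg .r14) (hr15 : w.reg .r15 = v.reg .r15)
    (hsame : Mem.SameExcept ws v.mem w.mem) (hws : ∀ x, x ∈ ws → BodyWin e x)
    (hcode : (conv u₀).code.In w.mem) (habi : (conv u₀).inv w) :
    Core cut' H rest frames u₀ e ret w := by
  have he_room := hc.entry.room
  have he_top := hc.entry.top
  simp only [vspec, ProgX.conv_stackLo, ProgX.conv_stackHi] at he_room he_top
  -- a window misses every slot `[RA − off, RA − off + 8)` with `off ≤ 32`: a saved register, the return address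
  have hmiss : ∀ (off : Nat), off ≤ 32 → ∀ x, x ∈ ws →
      (e.reg .rsp).toNat - off + 8 ≤ x.lo ∨ x.hi ≤ (e.reg .rsp).toNat - off := by
    intro off hoff x hx
    have hx' := hws x hx
    unfold BodyWin at hx'
    omega
  have hra : w.mem.readLE (e.reg .rsp) 8 = v.mem.readLE (e.reg .rsp) 8 := by
    apply hsame.readLE _ 8 (by omega)
    intro x hx
    have hm := hmiss 0 (by omega) x hx
    omega
  exact {
    entry := hc.entry
    pre := hc.pre
    rip := hrip
    rsp := hrsp
    rbx := by
      rw [hrbx]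
      exact hc.rbx
    r14 := by
      rw [hr14]
      exact hc.r14
    r15 := by
      rw [hr15]
      exact hc.r15
    slot_r13 := slot_sameExcept hsame (e.reg .rsp) 8 8 _ (by omega) (by omega) hc.slot_r13 (hmiss 8 (by omega))
    slot_r12 := slot_sameExcept hsame (e.reg .rsp) 16 8 _ (by omega) (by omega) hc.slot_r12 (hmiss 16 (by omega))
    slot_rbp := slot_sameExcept hsame (e.reg .rsp) 24 8 _ (by omega) (by omega) hc.slot_rbp (hmiss 24 (by omega))
    slot_rbx := slot_sameExcept hsame (e.reg .rsp) 32 8 _ (by omega) (by omega) hc.slot_rbx (hmiss 32 (by omega))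
    slot_ra := by
      rw [hra]
      exact hc.slot_ra
    same := by
      -- the footprint since the entry: every window is empty or lies inside one of the contract's
      apply hc.same.step_same' hsame
      intro x hx
      by_cases hempty : x.hi ≤ x.lo
      · exact Or.inl hempty
      · right
        have hx' := hws x hx
        unfold BodyWin at hx'
        simp only [X86.User.inSpans_cons, X86.User.inSpans_nil, or_false]
        omega
    code := hcode
    abi := habi
  }

/-- **`Core` AT A LATER STATE WITH THE SAME MEMORY** (`w_mem : s.mem = v.mem`: the arms `len < 0`, `cap < 64` that store nothing). -/
theorem Core.carry_eq {cut cut' : Word} {H : Heap} {rest : List Obj} {frames : List (Nat × FrameLayout)}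
    {u₀ e : State} {ret : Word} {v w : State}
    (hc : Core cut H rest frames u₀ e ret v)
    (hrip : w.rip = cut') (hrsp : w.reg .rsp = e.reg .rsp - 168)
    (hrbx : w.reg .rbx = v.reg .rbx) (hr14 : w.reg .r14 = v.reg .r14) (hr15 : w.reg .r15 = v.reg .r15)
    (hmem : w.mem = v.mem) (hcode : (conv u₀).code.In w.mem) (habi : (conv u₀).inv w) :
    Core cut' H rest frames u₀ e ret w := by
  have hsame : Mem.SameExcept [] v.mem w.mem := by
    rw [hmem]
    exact Mem.SameExcept.refl _ _
  refine hc.carry hrip hrsp hrbx hr14 hr15 hsame ?_ hcode habi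
  intro x hx
  exact absurd hx List.not_mem_nil

end prog_main

end Gif.Spec
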